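/- GENERATED by mk_final_copies.py from the proof of the farm's unit `start_decoder.C6a` (farm:start_decoder.C6a.1: Proof.lean) as the
   re-elaboration sweep compiled it — do not edit. -/
import Asan.CheckWalk
import Vorbis.Spec.Units.start_decoder_C6a
import Vorbis.Spec.Worked.start_decoder_C6a_Lemmas
import Vorbis.Spec.StartDecoderCarry
import Vorbis.Spec.StartDecoderC7

open X86 X86.User Asan Vorbis Vorbis.Spec Vorbis.Spec.StartDecoder

set_option maxRecDepth 100000
set_option maxHeartbeats 4000000

namespace Vorbis.Spec.start_decoder_C6a

/-- A window of segment C6a: the stack below the steady rsp (the pushed return addresses of the check call and of `error`, their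
frames), the dword field at offset `o` of the struct `cb(i)` at `c` (`o = 2112`: `sorted_entries`), `f->eof` / `f->error`
`[f + 136, f + 144)`. -/
def C6aWin (g : Ghost) (c o : Nat) (w : Span) : Prop :=
  (g.R - 408 ≤ w.lo ∧ w.hi ≤ g.R) ∨ (c + o ≤ w.lo ∧ w.hi ≤ c + o + 4) ∨ (g.f + 136 ≤ w.lo ∧ w.hi ≤ g.f + 144)

/-- **THE INVARIANT SIDE OF A SEGMENT THAT STORES ONE POINTER FIELD OF THE STRUCT `cb(i)`** (C6b: `codewords`, offset 40; the twin of
farm/worked/start_decoder.C2d's `c2d_carry`; it serves C6c / C6d with offsets 8 / 40): from `Frame` and CUR(i) at `v` and a later state `s` whose memory differs from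
`v.mem` only in windows `C6aWin` (no shadow byte): `Frame` at the new program counter, CUR(i), `cb(i)` unmoved, and the struct's bytes
before and after the field are kept (`Block.Kept`: every other field reads the same). -/
theorem c6a_carry {u₀ : State} {g : Ghost} {pc pc' : Word} {i : Nat} {A2 A3 Ai : Arena} {A : Arena × List Obj} {v s : State}
    {ws : List Span} (o : Nat) (ho : o + 4 ≤ 2120) (hfr : Frame u₀ g pc A v) (hcur : Cur g i A2 A3 Ai A v)
    (hs : Mem.SameExcept ws v.mem s.mem) (hun : ShadowUntouched v.mem s.mem)
    (hok : ∀ w, w ∈ ws → C6aWin g (g.cb v.mem i) o w)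
    (hrip : s.rip = pc') (hrsp : s.reg .rsp = v.reg .rsp) (hcode : CodeOK u₀ s.mem) (hinv : abiInv s)
    (hr14 : s.reg .r14 = v.reg .r14) :
    Frame u₀ g pc' A s ∧ Cur g i A2 A3 Ai A s ∧ g.cb s.mem i = g.cb v.mem i ∧
      (⟨g.cb v.mem i, o⟩ : Block).Kept v.mem s.mem ∧ (⟨g.cb v.mem i + o + 4, 2120 - o - 4⟩ : Block).Kept v.mem s.mem := by
  have hpos : Pos g A := Pos.of hfr hcur
  have hm0 : MInv g i A2 A3 Ai A v.mem := MInv.of hfr hcur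
  have hcw := hm0.c_where
  have p1 := hpos.r_eq
  have p2 := hpos.ra_lo
  have p3 := hpos.ra_hi
  have p4 := hpos.f_lo
  have p5 := hpos.f_hi
  have p6 := hpos.f_stack
  have p7 := hpos.objOut
  have p9 := hpos.ar_lo
  have p10 := hpos.ar_hi
  have p11 := hpos.ar_stack
  have hok0 : ∀ w, w ∈ ws → OkWin g Ai A (g.cb v.mem i) w := by
    intro w hw
    have k := hok w hw
    unfold C6aWin at k
    left
    unfold OkWin0
    omega
  have hb : Bits (g.Blk A) g.len s.mem g.f := by
    apply bits_kept hpos hcur.sd.bits hs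
    intro w hw
    have k := hok w hw
    unfold C6aWin at k
    omega
  have hfr' := Frame.step hfr hcur hs hun hok0 hb hrip hrsp hcode hinv
  obtain ⟨hcur', hcb⟩ := Cur.step hfr hcur hs hun hok0 hb hr14
  refine ⟨hfr', hcur', hcb, ?_, ?_⟩
  · apply Block.Kept.of_sameExcept hs _ (by simp only []; omega)
    intro w hw
    have k := hok w hw
    unfold C6aWin at k
    simp only []
    omega
  · apply Block.Kept.of_sameExcept hs _ (by simp only []; omega)
    intro w hw
    have k := hok w hw
    unfold C6aWin at k
    simp only []
    omega


/-- The fields of the book that the store `c->sorted_entries = n` does not touch read the same (the bytes `[c, c + 2112)`). -/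
theorem c6a_fields {m m' : Mem} {c : Nat} (hlo : (⟨c, 2112⟩ : Block).Kept m m') :
    Codebook.dimensions m' c = Codebook.dimensions m c ∧ Codebook.entries m' c = Codebook.entries m c ∧
      Codebook.codeword_lengths m' c = Codebook.codeword_lengths m c ∧ Codebook.sparse m' c = Codebook.sparse m c ∧
      (Fresh7 m c → Fresh5 m' c) := by
  have e_dim : Codebook.dimensions m' c = Codebook.dimensions m c := by
    simp only [vacc, voff]
    exact hlo.i32 _ (by simp only []; omega) (by simp only []; omega)
  have e_ent : Codebook.entries m' c = Codebook.entries m c := by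
    simp only [vacc, voff]
    exact hlo.i32 _ (by simp only []; omega) (by simp only []; omega)
  have e_cl : Codebook.codeword_lengths m' c = Codebook.codeword_lengths m c := by
    simp only [vacc, voff]
    exact hlo.u64 _ (by simp only []; omega) (by simp only []; omega)
  have e_sp : Codebook.sparse m' c = Codebook.sparse m c := by
    simp only [vacc, voff]
    exact hlo.u8 _ (by simp only []; omega) (by simp only []; omega)
  have e_lt : Codebook.lookup_type m' c = Codebook.lookup_type m c := by
    simp only [vacc, voff]
    exact hlo.u8 _ (by simp only []; omega) (by simp only []; omega)
  have e_lv : Codebook.lookup_values m' c = Codebook.lookup_values m c := by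
    simp only [vacc, voff]
    exact hlo.u32 _ (by simp only []; omega) (by simp only []; omega)
  have e_mu : Codebook.multiplicands m' c = Codebook.multiplicands m c := by
    simp only [vacc, voff]
    exact hlo.u64 _ (by simp only []; omega) (by simp only []; omega)
  have e_sc : Codebook.sorted_codewords m' c = Codebook.sorted_codewords m c := by
    simp only [vacc, voff]
    exact hlo.u64 _ (by simp only []; omega) (by simp only []; omega)
  have e_sv : Codebook.sorted_values m' c = Codebook.sorted_values m c := by
    simp only [vacc, voff]
    exact hlo.u64 _ (by simp only []; omega) (by simp only []; omega)
  refine ⟨e_dim, e_ent, e_cl, e_sp, ?_⟩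
  intro fr
  exact
    { lookup_type := by rw [e_lt]; exact fr.lookup_type
      lookup_values := by rw [e_lv]; exact fr.lookup_values
      multiplicands := by rw [e_mu]; exact fr.multiplicands
      sorted_codewords := by rw [e_sc]; exact fr.sorted_codewords
      sorted_values := by rw [e_sv]; exact fr.sorted_values }

/-- The dense book: 0x114668 … the return of `setup_malloc(f, 4·entries)` (0x1148b0). -/
theorem c6a_dense {Lay : Layout} (hLay : Lay.hi = 0x1000000) {μ : Microarch} (hμ : UserX.MicroOK μ) {u₀ : State}
    (hcode : HasCodeNat Lay u₀ Vorbis.L.start_decoder.entry Vorbis.Code.code_start_decoder.nat Vorbis.L.start_decoder.size)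
    (hst4 : Asan.SmallCheck Lay μ Vorbis.WayInv (Vorbis.CodeOK u₀) [.rax, .rcx, .rdx] 4 Vorbis.L.__asan_store4_noabort.entry)
    (hld4 : Asan.SmallCheck Lay μ Vorbis.WayInv (Vorbis.CodeOK u₀) [.rax, .rcx, .rdx] 4 Vorbis.L.__asan_load4_noabort.entry)
    (h_error : ∀ (others : List Obj) (frames : List (Nat × FrameLayout)), Calls Lay μ Vorbis.WayInv (Vorbis.conv u₀) Vorbis.L.error.entry (Vorbis.Spec.error.spec others frames))
    (h_malloc : ∀ (others : List Obj) (frames : List (Nat × FrameLayout)) (A : Arena), Calls Lay μ Vorbis.WayInv (Vorbis.conv u₀) Vorbis.L.setup_malloc.entry (Vorbis.Spec.setup_malloc.spec others frames A))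
    {g : Ghost} {i : Nat} {v : State} {A : Arena × List Obj} {lengths count : Nat} {A2 A3 Ai : Arena}
    (h : InC6 u₀ g i A2 A3 Ai A lengths count v) (hsp : Codebook.sparse v.mem (g.cb v.mem i) = 0) :
    ReachVia Lay μ WayInv v (fun w => AtERR u₀ g w ∨ AtC6b u₀ g i w ∨ AtC6c u₀ g i w) := by
  have hfr := h.frame
  have hhand := h.cur.hand
  have he := hfr.entry
  v_entry he
  simp only [depth] at he_room he_stack
  have w_rip := hfr.rip
  have w_rsp := hfr.rsp
  have w_eq : Mem.EqOn Vorbis.L.textLo Vorbis.L.textHi u₀.mem v.mem := hfr.code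
  have hdf : v.flags .df = false := (show abiInv _ from hfr.inv).1
  have hmx : v.mxcsr &&& 0x1F80 = 0x1F80 := (show abiInv _ from hfr.inv).2
  have hsse := Vorbis.sseOK_of_abiInv hfr.inv
  obtain ⟨hR1, hR2⟩ := hfr.r_eq
  have eR : g.R = (g.e.reg .rsp).toNat - 1480 := rfl
  have eRA : g.RA = (g.e.reg .rsp).toNat := rfl
  have c_rsp : v.reg .rsp = g.e.reg .rsp - 1480 := by
    rw [w_rsp, eR, ← Vorbis.addr_sub_lit _ 1480 (by show (1480 : Nat) ≤ _; omega), Vorbis.addr_toNat]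
  clear w_rsp
  have k_rsp := c_rsp
  have r_f : v.mem.readLE (g.e.reg .rsp - 1456) 8 = g.f := by
    have e : g.e.reg .rsp - 1456 = addr (g.R + 0x18) := by
      have e1 : g.R + 0x18 = (g.e.reg .rsp).toNat - 1456 := by
        show (g.e.reg .rsp).toNat - 1480 + 0x18 = _
        omega
      rw [e1, ← Vorbis.addr_sub_lit _ 1456 (by show (1456 : Nat) ≤ _; omega), Vorbis.addr_toNat]
    rw [e]
    exact h.cur.slot_f
  have hpos : Pos g A := Pos.of hfr h.cur
  have hm0 : MInv g i A2 A3 Ai A v.mem := MInv.of hfr h.cur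
  have hcw := hm0.c_where
  -- the `lengths` block of a dense book: allocated since `Ai`
  have hlenS : Since Ai A.1 ⟨lengths, (Codebook.entries v.mem (g.cb v.mem i)).toNat⟩ := h.place.dense_block hsp
  obtain ⟨hlin, hloff⟩ := young_off_book hm0 hlenS
  simp only [] at hlin hloff
  obtain ⟨c, hc⟩ : ∃ c, g.cb v.mem i = c := ⟨_, rfl⟩
  have c_r14 := h.cur.r14
  have c_r13 := h.r13
  have c_rbp := h.rbp
  have c_rbx := h.rbx
  rw [hsp] at c_r13
  rw [hc] at c_r14 hcw hlin hloff
  have hcT : (addr c).toNat = c := Vorbis.toNat_addr _ (by omega)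
  have hText : 1154368 ≤ A.1.B := hhand.arenaText
  have hfT : (addr g.f).toNat = g.f := Vorbis.toNat_addr _ (by
    have := hpos.f_hi
    omega)
  have hk1 := h.k1
  rw [hc] at hk1
  have r4 : v.mem.readLE (addr c + 4) 4 = (Codebook.entries v.mem c).toNat := by
    have h0 := hk1.ent_nonneg
    simp only [vacc, voff] at h0 ⊢
    rw [Vorbis.addr_add_lit]
    exact v.mem.u32_of_i32_nonneg (c + 4) h0
  have herr := h_error A.2 g.frames'
  have hmal := h_malloc A.2 g.frames' A.1
  obtain ⟨hf1, hf2, hf3⟩ := c6a_obj_where h.cur hfr.shadow hfr.offText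
  have p6 := hpos.f_stack
  u_walk hcode [hμ.vendor] until [0x11489b, 0x1148e7, 0x114699, pc_ERR] span [Vorbis.L.textLo, Vorbis.L.textHi] side (v_side)
  case check_11466f =>
    have hun : ShadowUntouched v.mem s_11466f.mem := by v_untouched
    have hsite := C7.cb_site h.cur 2112 4 (by omega) (by omega)
    rw [hc] at hsite
    apply Vorbis.Spec.check_site hfr.shadow hun hsite
    u_omega
  case check_114896 =>
    have hun : ShadowUntouched v.mem s_114896.mem := by v_untouched
    have hsite := C7.cb_site h.cur 4 4 (by omega) (by omega)
    rw [hc] at hsite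
    apply Vorbis.Spec.check_site hfr.shadow hun hsite
    u_omega
  all_goals try (exact absurd (by decide) hbr_11467e)
  all_goals try (exact absurd (by decide) hbr_11468b)
  -- STAGE 2: the state `s` = 0x11489b (the check of `c + 4` returned): `InC6Mid` there, then the call
  have hsA : Mem.SameExcept [⟨g.R - 408, g.R⟩, ⟨c + 2112, c + 2116⟩] v.mem s_114896r.mem := by u_same
  have hunA : ShadowUntouched v.mem s_114896r.mem := by v_untouched
  have hokA : ∀ w, w ∈ [(⟨g.R - 408, g.R⟩ : Span), ⟨c + 2112, c + 2116⟩] → C6aWin g (g.cb v.mem i) 2112 w := by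
    intro w hw
    rw [hc]
    simp only [List.mem_cons, List.mem_nil_iff, or_false] at hw
    unfold C6aWin
    rcases hw with rfl | rfl <;> simp only [] <;> omega
  have hrspS : s_114896r.reg .rsp = v.reg .rsp := by
    rw [w_rsp, c_rsp]
  have hinvS : abiInv s_114896r := by v_inv
  obtain ⟨hfrS, hcurS, hcbS, hlo, _⟩ := c6a_carry 2112 (by omega) hfr h.cur hsA hunA hokA w_rip hrspS w_eq hinvS
    (w_kept.get .r14 rfl)
  rw [hc] at hcbS hlo
  obtain ⟨e_dim, e_ent, e_cl, e_sp, hfresh⟩ := c6a_fields hlo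
  -- the stored count
  have hcnt := h.dense_count hsp
  rw [hc] at hcnt
  have hcle : count ≤ (Codebook.entries v.mem c).toNat := by
    rw [hcnt]
    exact longCount_le _ _ _
  have hE0 := hk1.ent_nonneg
  have hE1 := hk1.ent_lt
  have hp32 : (Word.part Width.w32 (addr count)).toNat = count := by
    rw [Vorbis.toNat_part32, Vorbis.toNat_addr _ (by omega)]
    omega
  have e_se : Codebook.sorted_entries s_114896r.mem c = (count : Int) := by
    have hrd : s_114896r.mem.readLE (addr c + 2112) 4 = (Word.part Width.w32 (addr count)).toNat := by
      rw [w_mem]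
      u_read
    have hu : s_114896r.mem.u32 (c + 2112) = count := by
      unfold Mem.u32
      rw [← Vorbis.addr_add_lit, hrd, hp32]
    simp only [vacc, voff]
    rw [Mem.i32_def, hu]
    have := sint32_cases count
    omega
  -- the bytes of `lengths` are kept by the store and the pushes
  have p1 := hpos.r_eq
  have p2 := hpos.ra_lo
  have p3 := hpos.ra_hi
  have p10 := hpos.ar_hi
  have p11 := hpos.ar_stack
  have hlenE : Mem.EqOn lengths (lengths + (Codebook.entries v.mem c).toNat) v.mem s_114896r.mem := by
    apply hsA.eqOn
    intro w hw
    simp only [List.mem_cons, List.mem_nil_iff, or_false] at hw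
    rcases hw with rfl | rfl <;> simp only [] <;> omega
  have hlenI : lengths + (Codebook.entries v.mem c).toNat ≤ 2 ^ 64 := by omega
  have hsp' := hsp
  have hfr7 := h.fresh
  have hlenL := h.lenL
  have hdeq := h.place.dense_eq hsp
  rw [hc] at hsp' hfr7 hlenL hdeq hlenS
  have hno1 : ¬ Codebook.sparse s_114896r.mem c = 1 := by
    rw [e_sp, hsp']
    decide
  have hk2S : Codebook.K2 s_114896r.mem c :=
    { sparse_01 := by rw [e_sp, hsp']; exact Or.inl rfl
      se_nonneg := by rw [e_se]; omega
      se_le := by rw [e_se, e_ent]; omega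
      sparse_pos := fun h1 => absurd h1 hno1
      sparse_quarter := fun h1 => absurd h1 hno1 }
  have hmidS : InC6Mid u₀ g i A2 A3 Ai A.1 A lengths 1132699 s_114896r :=
    { frame := hfrS
      cur := hcurS
      extw := h.cur.ages.exti
      extw' := Arena.Extends.refl _
      k1 := by
        rw [hcbS]
        exact ⟨by rw [e_dim]; exact hk1.dim_pos, by rw [e_dim]; exact hk1.dim_le, by rw [e_ent]; exact hk1.ent_nonneg,
          by rw [e_ent]; exact hk1.ent_lt⟩
      k2 := by rw [hcbS]; exact hk2S
      rbx := (w_kept.get .rbx rfl).trans c_rbx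
      lenL := by rw [hcbS, e_ent]; exact hlenL.same hlenE hlenI
      fresh := by rw [hcbS]; exact hfresh hfr7 }
  have sparse0S : Codebook.sparse s_114896r.mem (g.cb s_114896r.mem i) = 0 := by
    rw [hcbS, e_sp]
    exact hsp'
  have dlS : Since Ai A.1 ⟨Codebook.codeword_lengths s_114896r.mem (g.cb s_114896r.mem i),
      (Codebook.entries s_114896r.mem (g.cb s_114896r.mem i)).toNat⟩ := by
    rw [hcbS, e_cl, e_ent, ← hdeq]
    exact hlenS
  have deqS : lengths = Codebook.codeword_lengths s_114896r.mem (g.cb s_114896r.mem i) := by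
    rw [hcbS, e_cl]
    exact hdeq
  have cntS : CNT' s_114896r.mem lengths (g.cb s_114896r.mem i) := by
    unfold CNT'
    rw [hcbS, e_ent, e_se, C7.longCount_same hlenE hlenI, ← hcnt]
  have c_memS := w_mem
  have c_rspS := w_rsp
  have c_keptS := w_kept
  have hRS : (g.e.reg .rsp - 1488).toNat + 8 = g.R := by u_omega
  u_walk hcode [hμ.vendor] until [Vorbis.L.start_decoder.cut128] span [Vorbis.L.textLo, Vorbis.L.textHi] side (v_side)
  case call_inv => v_inv
  case pre_1148ab =>
    have hmem1 : s_1148ab.mem = s_114896r.mem.writeLE (g.e.reg .rsp - 1488) 8 1132720 := by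
      rw [w_mem, c_memS, Mem.writeLE_writeLE_same _ _ 8 _ _ (by decide)]
    have hun : ShadowUntouched s_114896r.mem s_1148ab.mem := by
      rw [hmem1]
      exact Mem.eqOn_writeLE _ _ 8 _ 0xC00000 0x200000 (by omega) (by omega)
    apply c6a_malloc_pre hfrS hcurS hun
    · rw [hmem1]
      apply Mem.EqOn.writeLE
      · u_omega
      · u_omega
    · rw [w_rsp]
      u_omega
    · rw [w_rdi]
      exact hfT
  -- 0x1148b0: setup_malloc(f, 4·E) returned
  have hElt : (Codebook.entries v.mem c).toNat < 2 ^ 24 := by omega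
  have ersi : (s_1148ab.reg .rsi).toNat % 2 ^ 32 = 4 * (Codebook.entries v.mem c).toNat := by
    have e1 : (BitVec.ofNat 32 (Codebook.entries v.mem c).toNat).toNat = (Codebook.entries v.mem c).toNat :=
      toNat_ofNat32 _ (by omega)
    rw [w_rsi_1148ab, c6a_lea4 _ (by rw [e1]; omega), e1]
    omega
  have hmemS : s_1148ab.mem = s_114896r.mem.writeLE (g.e.reg .rsp - 1488) 8 1132720 := by
    rw [w_mem_1148ab, c_memS, Mem.writeLE_writeLE_same _ _ 8 _ _ (by decide)]
  simp only [X86.User.Spec.footprint, vspec] at w_same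
  have e_sp' : (s_1148ab.reg .rsp).toNat + 8 = g.R := by
    rw [w_rsp_1148ab]
    exact hRS
  have e_rdi : (s_1148ab.reg .rdi).toNat = g.f := by
    rw [w_rdi_1148ab]
    exact hfT
  have hrspR : s_1148abr.reg .rsp = s_114896r.reg .rsp := by
    rw [w_rsp, c_rspS]
  have hr14R : s_1148abr.reg .r14 = s_114896r.reg .r14 :=
    (w_kept.get .r14 rfl).trans (c_keptS.get .r14 rfl).symm
  have hrbxR : s_1148abr.reg .rbx = s_114896r.reg .rbx :=
    (w_kept.get .rbx rfl).trans (c_keptS.get .rbx rfl).symm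
  have eES : (Codebook.entries s_114896r.mem (g.cb s_114896r.mem i)).toNat = (Codebook.entries v.mem c).toNat := by
    rw [hcbS, e_ent]
  by_cases hfit : A.1.Fits ((s_1148ab.reg .rsi).toNat % 2 ^ 32)
  · obtain ⟨r1, r2, r3, r4', r5⟩ := Cur.alloc_call hfrS hcurS hmemS hRS e_sp' e_rdi w_same w_post hfit w_rip hrspR
      (Vorbis.conv_code_eqOn w_code) w_inv hr14R
    apply ReachVia.done
    refine Or.inr (Or.inl ⟨(A.1.pushSetup ((s_1148ab.reg .rsi).toNat % 2 ^ 32),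
      A.1.newSetupObj ((s_1148ab.reg .rsi).toNat % 2 ^ 32) :: A.2), lengths, A2, A3, Ai, A.1, ?_⟩)
    refine c6a_build_dense hmidS sparse0S dlS deqS (h.place.dense_temps hsp) cntS r1 r2 r3 r4' (A.1.extends_pushSetup _) rfl hrbxR
      (Or.inr ?_)
    have hsince := hcurS.sd.arena.since_pushSetup ((s_1148ab.reg .rsi).toNat % 2 ^ 32)
    rw [r5, eES, ← ersi, Nat.add_assoc]
    exact hsince
  · obtain ⟨r1, r2, r3, r4', r5⟩ := Cur.alloc_fail_any hfrS hcurS hmemS hRS e_sp' e_rdi w_same w_post hfit w_rip hrspR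
      (Vorbis.conv_code_eqOn w_code) w_inv hr14R
    apply ReachVia.done
    exact Or.inr (Or.inl ⟨A, lengths, A2, A3, Ai, A.1,
      c6a_build_dense hmidS sparse0S dlS deqS (h.place.dense_temps hsp) cntS r1 r2 r3 r4' (Arena.Extends.refl _) rfl hrbxR
        (Or.inl r5)⟩)

/-- The sparse book: 0x114668 … FIX 4 (→ `AtERR`) … the return of `setup_malloc(f, sorted_entries)` (0x1148f3). -/
theorem c6a_sparse {Lay : Layout} (hLay : Lay.hi = 0x1000000) {μ : Microarch} (hμ : UserX.MicroOK μ) {u₀ : State}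
    (hcode : HasCodeNat Lay u₀ Vorbis.L.start_decoder.entry Vorbis.Code.code_start_decoder.nat Vorbis.L.start_decoder.size)
    (hst4 : Asan.SmallCheck Lay μ Vorbis.WayInv (Vorbis.CodeOK u₀) [.rax, .rcx, .rdx] 4 Vorbis.L.__asan_store4_noabort.entry)
    (hld4 : Asan.SmallCheck Lay μ Vorbis.WayInv (Vorbis.CodeOK u₀) [.rax, .rcx, .rdx] 4 Vorbis.L.__asan_load4_noabort.entry)
    (h_error : ∀ (others : List Obj) (frames : List (Nat × FrameLayout)), Calls Lay μ Vorbis.WayInv (Vorbis.conv u₀) Vorbis.L.error.entry (Vorbis.Spec.error.spec others frames))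
    (h_malloc : ∀ (others : List Obj) (frames : List (Nat × FrameLayout)) (A : Arena), Calls Lay μ Vorbis.WayInv (Vorbis.conv u₀) Vorbis.L.setup_malloc.entry (Vorbis.Spec.setup_malloc.spec others frames A))
    {g : Ghost} {i : Nat} {v : State} {A : Arena × List Obj} {lengths count : Nat} {A2 A3 Ai : Arena}
    (h : InC6 u₀ g i A2 A3 Ai A lengths count v) (hsp : Codebook.sparse v.mem (g.cb v.mem i) = 1) :
    ReachVia Lay μ WayInv v (fun w => AtERR u₀ g w ∨ AtC6b u₀ g i w ∨ AtC6c u₀ g i w) := by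
  have hfr := h.frame
  have hhand := h.cur.hand
  have he := hfr.entry
  v_entry he
  simp only [depth] at he_room he_stack
  have w_rip := hfr.rip
  have w_rsp := hfr.rsp
  have w_eq : Mem.EqOn Vorbis.L.textLo Vorbis.L.textHi u₀.mem v.mem := hfr.code
  have hdf : v.flags .df = false := (show abiInv _ from hfr.inv).1
  have hmx : v.mxcsr &&& 0x1F80 = 0x1F80 := (show abiInv _ from hfr.inv).2
  have hsse := Vorbis.sseOK_of_abiInv hfr.inv
  obtain ⟨hR1, hR2⟩ := hfr.r_eq
  have eR : g.R = (g.e.reg .rsp).toNat - 1480 := rfl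
  have eRA : g.RA = (g.e.reg .rsp).toNat := rfl
  have c_rsp : v.reg .rsp = g.e.reg .rsp - 1480 := by
    rw [w_rsp, eR, ← Vorbis.addr_sub_lit _ 1480 (by show (1480 : Nat) ≤ _; omega), Vorbis.addr_toNat]
  clear w_rsp
  have k_rsp := c_rsp
  have r_f : v.mem.readLE (g.e.reg .rsp - 1456) 8 = g.f := by
    have e : g.e.reg .rsp - 1456 = addr (g.R + 0x18) := by
      have e1 : g.R + 0x18 = (g.e.reg .rsp).toNat - 1456 := by
        show (g.e.reg .rsp).toNat - 1480 + 0x18 = _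
        omega
      rw [e1, ← Vorbis.addr_sub_lit _ 1456 (by show (1456 : Nat) ≤ _; omega), Vorbis.addr_toNat]
    rw [e]
    exact h.cur.slot_f
  have hpos : Pos g A := Pos.of hfr h.cur
  have hm0 : MInv g i A2 A3 Ai A v.mem := MInv.of hfr h.cur
  have hcw := hm0.c_where
  -- the `lengths` block of a sparse book: the temp block P1, above every setup block (the struct is in one)
  have hT := h.place.sparse_temp hsp
  have hTl : A.1.TBlock lengths (Codebook.entries v.mem (g.cb v.mem i)).toNat := hT.tblock List.mem_cons_self
  have hlr := h.cur.sd.arena.tblock_range hTl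
  have hlo' := h.cur.sd.arena.tblock_off hTl
  have hr8 := le_r8 (Codebook.entries v.mem (g.cb v.mem i)).toNat
  have hab := h.cur.sd.arena.bounds
  have hcbA : A.1.Blk (codebooksBlock v.mem g.f) := h.cur.ages.cbOK.F2.mono h.cur.ages.exti
  have hbr := h.cur.sd.arena.block_range hcbA
  have hci := h.cur.ages.cbOK.cb_in i h.cur.lt
  simp only [vblock, voff] at hci hbr
  have hr8c := le_r8 (2120 * (stb_vorbis.codebook_count v.mem g.f).toNat)
  have hloff : g.cb v.mem i + 2120 ≤ lengths := by
    unfold Ghost.cb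
    omega
  obtain ⟨c, hc⟩ : ∃ c, g.cb v.mem i = c := ⟨_, rfl⟩
  have c_r14 := h.cur.r14
  have c_r13 := h.r13
  have c_rbp := h.rbp
  have c_rbx := h.rbx
  rw [hsp] at c_r13
  rw [hc] at c_r14 hcw hloff hT hTl hlr hlo' hr8
  have hcT : (addr c).toNat = c := Vorbis.toNat_addr _ (by omega)
  have hText : 1154368 ≤ A.1.B := hhand.arenaText
  have hfT : (addr g.f).toNat = g.f := Vorbis.toNat_addr _ (by
    have := hpos.f_hi
    omega)
  have hk1 := h.k1
  rw [hc] at hk1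
  have r4 : v.mem.readLE (addr c + 4) 4 = (Codebook.entries v.mem c).toNat := by
    have h0 := hk1.ent_nonneg
    simp only [vacc, voff] at h0 ⊢
    rw [Vorbis.addr_add_lit]
    exact v.mem.u32_of_i32_nonneg (c + 4) h0
  have hsub : ∀ o, o ∈ stackObjs g.frames ++ A.2 → o ∈ stackObjs g.frames' ++ A.2 := by
    intro o ho
    unfold Ghost.frames'
    rw [stackObjs_cons]
    rcases List.mem_append.mp ho with hs | ho'
    · exact List.mem_append_left _ (List.mem_append_right _ hs)
    · exact List.mem_append_right _ ho'
  have t1 : (g.e.reg .rsp - 1488).toNat = (g.e.reg .rsp).toNat - 1488 := by u_omega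
  have herr := h_error A.2 g.frames'
  have hmal := h_malloc A.2 g.frames' A.1
  obtain ⟨hf1, hf2, hf3⟩ := c6a_obj_where h.cur hfr.shadow hfr.offText
  have p6 := hpos.f_stack
  u_walk hcode [hμ.vendor] until [0x11489b, 0x1148e7, 0x114699, pc_ERR] span [Vorbis.L.textLo, Vorbis.L.textHi] side (v_side)
  case check_11466f =>
    have hun : ShadowUntouched v.mem s_11466f.mem := by v_untouched
    have hsite := C7.cb_site h.cur 2112 4 (by omega) (by omega)
    rw [hc] at hsite
    apply Vorbis.Spec.check_site hfr.shadow hun hsite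
    u_omega
  all_goals try (exact absurd hbr_11467e (by decide))
  all_goals try (exact absurd hbr_11468b (by decide))
  case call_inv => v_inv
  case pre_114888 =>
    have hun : ShadowUntouched v.mem s_114888.mem := by v_untouched
    have hf' : (s_114888.reg .rdi).toNat = g.f := by
      rw [w_rdi]
      exact hfT
    have hrs : (s_114888.reg .rsp).toNat + 8 = g.R := by
      rw [w_rsp]
      u_omega
    refine ⟨⟨?_, hfr.offText⟩, ?_⟩
    · rw [hrs]
      exact hfr.shadow.untouched hun
    · rw [hf']
      exact hhand.obj.mono hsub
  case cont =>
    -- FIX 4: `error(f, VORBIS_invalid_setup)` returned (after the store of `sorted_entries`): the `jmp` to the epilogue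
    have hsA : Mem.SameExcept [⟨g.R - 408, g.R⟩, ⟨c + 2112, c + 2116⟩] v.mem s_114888.mem := by u_same
    have hunA : ShadowUntouched v.mem s_114888.mem := by v_untouched
    rw [w_mem_114888] at hsA hunA
    v_after_call w_rsp_114888 w_mem_114888
    have hf : (s_114888.reg .rdi).toNat = g.f := by
      rw [w_rdi_114888]
      exact hfT
    simp only [hf, t1] at w_same
    have hp : s_114888r.reg .rax = 0 ∧ ShadowUntouched s_114888.mem s_114888r.mem ∧
        s_114888r.mem.readLE (s_114888.reg .rdi + 140) 4 = (s_114888.reg .rsi).toNat % 2 ^ 32 := w_post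
    have w_rax : s_114888r.reg .rax = 0 := hp.1
    have hun3 : ShadowUntouched s_114888.mem s_114888r.mem := hp.2.1
    rw [w_mem_114888] at hun3
    have hsB : Mem.SameExcept [⟨g.R - 408, g.R⟩, ⟨c + 2112, c + 2116⟩, ⟨g.f + 140, g.f + 144⟩] v.mem s_114888r.mem := by
      refine (C7.sameExcept_weaken hsA ?_).trans (w_same.mono ?_)
      · intro w hw
        simp only [List.mem_cons, List.mem_nil_iff, or_false] at hw ⊢
        rcases hw with rfl | rfl
        · exact Or.inl rfl
        · exact Or.inr (Or.inl rfl)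
      · intro w hw a h1 h2
        simp only [List.mem_cons, List.mem_nil_iff, or_false] at hw
        rcases hw with rfl | rfl
        · simp only [] at h1 h2
          exact ⟨_, List.mem_cons_self, by simp only []; omega, by simp only []; omega⟩
        · simp only [] at h1 h2
          exact ⟨_, List.mem_cons_of_mem _ (List.mem_cons_of_mem _ List.mem_cons_self), by simp only []; omega,
            by simp only []; omega⟩
    have hunB : ShadowUntouched v.mem s_114888r.mem := Mem.EqOn.trans hunA hun3
    have hokB : ∀ w, w ∈ [(⟨g.R - 408, g.R⟩ : Span), ⟨c + 2112, c + 2116⟩, ⟨g.f + 140, g.f + 144⟩] →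
        C6aWin g (g.cb v.mem i) 2112 w := by
      intro w hw
      rw [hc]
      simp only [List.mem_cons, List.mem_nil_iff, or_false] at hw
      unfold C6aWin
      rcases hw with rfl | rfl | rfl <;> simp only [] <;> omega
    u_walk hcode [hμ.vendor] until [0x11489b, 0x1148e7, 0x114699, pc_ERR] span [Vorbis.L.textLo, Vorbis.L.textHi] side (v_side)
    have hsC : Mem.SameExcept [⟨g.R - 408, g.R⟩, ⟨c + 2112, c + 2116⟩, ⟨g.f + 140, g.f + 144⟩] v.mem s_11488d.mem := by
      rw [w_mem]
      exact hsB
    have hunC : ShadowUntouched v.mem s_11488d.mem := by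
      rw [w_mem]
      exact hunB
    have hinv' : abiInv s_11488d := by
      refine Vorbis.abiInv_of ?_ ?_
      · rw [w_flags]
        exact w_df
      · rw [w_mxcsr]
        exact w_mx
    have hrsp' : s_11488d.reg .rsp = v.reg .rsp := by
      rw [w_rsp, c_rsp]
    obtain ⟨hfr', hcur', _, _, _⟩ := c6a_carry 2112 (by omega) hfr h.cur hsC hunC hokB w_rip hrsp' w_eq hinv'
      (w_kept.get .r14 rfl)
    apply ReachVia.done
    refine Or.inl ⟨A, hfr', hhand, Or.inl ⟨?_, hcur'.failed⟩⟩
    rw [w_rax]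
    rfl
  all_goals try (exact absurd hbr_114693 hbr_114682)
  -- STAGE 2: the state `s` = 0x1148e7: `InC6Mid` there, then `setup_malloc(f, sorted_entries)`
  have hsA : Mem.SameExcept [⟨g.R - 408, g.R⟩, ⟨c + 2112, c + 2116⟩] v.mem s_114693.mem := by u_same
  have hunA : ShadowUntouched v.mem s_114693.mem := by v_untouched
  have hokA : ∀ w, w ∈ [(⟨g.R - 408, g.R⟩ : Span), ⟨c + 2112, c + 2116⟩] → C6aWin g (g.cb v.mem i) 2112 w := by
    intro w hw
    rw [hc]
    simp only [List.mem_cons, List.mem_nil_iff, or_false] at hw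
    unfold C6aWin
    rcases hw with rfl | rfl <;> simp only [] <;> omega
  have hrspS : s_114693.reg .rsp = v.reg .rsp := by
    rw [w_rsp, c_rsp]
  have hinvS : abiInv s_114693 := by v_inv
  obtain ⟨hfrS, hcurS, hcbS, hlo, _⟩ := c6a_carry 2112 (by omega) hfr h.cur hsA hunA hokA w_rip hrspS w_eq hinvS
    (w_kept.get .r14 rfl)
  rw [hc] at hcbS hlo
  obtain ⟨e_dim, e_ent, e_cl, e_sp, hfresh⟩ := c6a_fields hlo
  obtain ⟨hcnt, hquart⟩ := h.sparse_count hsp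
  rw [hc] at hcnt hquart
  have hcle : count ≤ (Codebook.entries v.mem c).toNat := by
    rw [hcnt]
    exact usedCount_le _ _ _
  have hE0 := hk1.ent_nonneg
  have hE1 := hk1.ent_lt
  have hp32 : (Word.part Width.w32 (addr count)).toNat = count := by
    rw [Vorbis.toNat_part32, Vorbis.toNat_addr _ (by omega)]
    omega
  have hcpos : 1 ≤ count := by
    rw [hp32] at hbr_114693
    omega
  have e_se : Codebook.sorted_entries s_114693.mem c = (count : Int) := by
    have hrd : s_114693.mem.readLE (addr c + 2112) 4 = (Word.part Width.w32 (addr count)).toNat := by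
      rw [w_mem]
      u_read
    have hu : s_114693.mem.u32 (c + 2112) = count := by
      unfold Mem.u32
      rw [← Vorbis.addr_add_lit, hrd, hp32]
    simp only [vacc, voff]
    rw [Mem.i32_def, hu]
    have := sint32_cases count
    omega
  have p1 := hpos.r_eq
  have p2 := hpos.ra_lo
  have p3 := hpos.ra_hi
  have p7 := hpos.objOut
  have p10 := hpos.ar_hi
  have p11 := hpos.ar_stack
  have hlenE : Mem.EqOn lengths (lengths + (Codebook.entries v.mem c).toNat) v.mem s_114693.mem := by
    apply hsA.eqOn
    intro w hw
    simp only [List.mem_cons, List.mem_nil_iff, or_false] at hw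
    rcases hw with rfl | rfl <;> simp only [] <;> omega
  have hlenI : lengths + (Codebook.entries v.mem c).toNat ≤ 2 ^ 64 := by omega
  have hsp' := hsp
  have hfr7 := h.fresh
  have hlenL := h.lenL
  rw [hc] at hsp' hfr7 hlenL
  have hno0 : ¬ Codebook.sparse s_114693.mem c = 0 := by
    rw [e_sp, hsp']
    decide
  have hk2S : Codebook.K2 s_114693.mem c :=
    { sparse_01 := by rw [e_sp, hsp']; exact Or.inr rfl
      se_nonneg := by rw [e_se]; omega
      se_le := by rw [e_se, e_ent]; omega
      sparse_pos := fun _ => by rw [e_se]; omega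
      sparse_quarter := fun _ => by rw [e_se, e_ent]; exact hquart }
  have hmidS : InC6Mid u₀ g i A2 A3 Ai A.1 A lengths 1132775 s_114693 :=
    { frame := hfrS
      cur := hcurS
      extw := h.cur.ages.exti
      extw' := Arena.Extends.refl _
      k1 := by
        rw [hcbS]
        exact ⟨by rw [e_dim]; exact hk1.dim_pos, by rw [e_dim]; exact hk1.dim_le, by rw [e_ent]; exact hk1.ent_nonneg,
          by rw [e_ent]; exact hk1.ent_lt⟩
      k2 := by rw [hcbS]; exact hk2S
      rbx := (w_kept.get .rbx rfl).trans c_rbx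
      lenL := by rw [hcbS, e_ent]; exact hlenL.same hlenE hlenI
      fresh := by rw [hcbS]; exact hfresh hfr7 }
  have eES : (Codebook.entries s_114693.mem (g.cb s_114693.mem i)).toNat = (Codebook.entries v.mem c).toNat := by
    rw [hcbS, e_ent]
  have eSES : (Codebook.sorted_entries s_114693.mem (g.cb s_114693.mem i)).toNat = count := by
    rw [hcbS, e_se]
    omega
  have sparse1S : Codebook.sparse s_114693.mem (g.cb s_114693.mem i) = 1 := by
    rw [hcbS, e_sp]
    exact hsp'
  have tempsS : TempsAre A.1 [(lengths, (Codebook.entries s_114693.mem (g.cb s_114693.mem i)).toNat)] := by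
    rw [eES]
    exact hT
  have cntS : CNT s_114693.mem lengths (g.cb s_114693.mem i) := by
    unfold CNT
    rw [hcbS, e_ent, e_se, C7.usedCount_same hlenE hlenI, ← hcnt]
  have c_memS := w_mem
  have c_rspS := w_rsp
  have c_keptS := w_kept
  have hRS : (g.e.reg .rsp - 1488).toNat + 8 = g.R := by u_omega
  u_walk hcode [hμ.vendor] until [Vorbis.L.start_decoder.cut130] span [Vorbis.L.textLo, Vorbis.L.textHi] side (v_side)
  case call_inv => v_inv
  case pre_1148ee =>
    have hmem1 : s_1148ee.mem = s_114693.mem.writeLE (g.e.reg .rsp - 1488) 8 1132787 := by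
      rw [w_mem, c_memS]
    have hun : ShadowUntouched s_114693.mem s_1148ee.mem := by
      rw [hmem1]
      exact Mem.eqOn_writeLE _ _ 8 _ 0xC00000 0x200000 (by omega) (by omega)
    apply c6a_malloc_pre hfrS hcurS hun
    · rw [hmem1]
      apply Mem.EqOn.writeLE
      · u_omega
      · u_omega
    · rw [w_rsp]
      u_omega
    · rw [w_rdi]
      exact hfT
  -- 0x1148f3: setup_malloc(f, sorted_entries) returned
  have ersi : (s_1148ee.reg .rsi).toNat % 2 ^ 32 = count := by
    rw [w_rsi_1148ee, Vorbis.toNat_ofBV32, hp32]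
    omega
  have hmemS : s_1148ee.mem = s_114693.mem.writeLE (g.e.reg .rsp - 1488) 8 1132787 := by
    rw [w_mem_1148ee, c_memS]
  simp only [X86.User.Spec.footprint, vspec] at w_same
  have e_sp' : (s_1148ee.reg .rsp).toNat + 8 = g.R := by
    rw [w_rsp_1148ee]
    exact hRS
  have e_rdi : (s_1148ee.reg .rdi).toNat = g.f := by
    rw [w_rdi_1148ee]
    exact hfT
  have hrspR : s_1148eer.reg .rsp = s_114693.reg .rsp := by
    rw [w_rsp, c_rspS]
  have hr14R : s_1148eer.reg .r14 = s_114693.reg .r14 :=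
    (w_kept.get .r14 rfl).trans (c_keptS.get .r14 rfl).symm
  have hrbxR : s_1148eer.reg .rbx = s_114693.reg .rbx :=
    (w_kept.get .rbx rfl).trans (c_keptS.get .rbx rfl).symm
  -- the bytes of the temp block P1 = `lengths` over the call (the push, then the callee's footprint: stack, `*f`, shadow)
  have hpushS : Mem.SameExcept [⟨g.R - 8, g.R⟩] s_114693.mem s_1148ee.mem := by
    rw [hmemS]
    apply Mem.SameExcept.writeLE
    · omega
    · refine ⟨_, List.mem_cons_self, ?_, ?_⟩
      · simp only []
        omega
      · simp only []
        omega
  have hlenK : (Block.mk lengths (Codebook.entries s_114693.mem (g.cb s_114693.mem i)).toNat).Kept s_114693.mem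
      s_1148eer.mem := by
    rw [eES]
    refine (Block.Kept.of_sameExcept hpushS ?_ (by simp only []; omega)).trans
      (Block.Kept.of_sameExcept w_same ?_ (by simp only []; omega))
    · intro w hw
      rw [List.mem_singleton.mp hw]
      simp only []
      omega
    · intro w hw
      simp only [List.mem_cons, List.mem_nil_iff, or_false] at hw
      rcases hw with rfl | rfl | rfl | rfl
      · simp only []
        omega
      · simp only []
        omega
      · simp only []
        omega
      · unfold shadowSpan
        simp only []
        omega
  by_cases hfit : A.1.Fits ((s_1148ee.reg .rsi).toNat % 2 ^ 32)
  · obtain ⟨r1, r2, r3, r4', r5⟩ := Cur.alloc_call hfrS hcurS hmemS hRS e_sp' e_rdi w_same w_post hfit w_rip hrspR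
      (Vorbis.conv_code_eqOn w_code) w_inv hr14R
    apply ReachVia.done
    refine Or.inr (Or.inr ⟨(A.1.pushSetup ((s_1148ee.reg .rsi).toNat % 2 ^ 32),
      A.1.newSetupObj ((s_1148ee.reg .rsi).toNat % 2 ^ 32) :: A.2), lengths, A2, A3, Ai, A.1, ?_⟩)
    refine c6a_build_sparse hmidS sparse1S tempsS cntS r1 r2 r3 r4' (A.1.extends_pushSetup _) rfl rfl hrbxR hlenK
      (Or.inr ?_)
    have hsince := hcurS.sd.arena.since_pushSetup ((s_1148ee.reg .rsi).toNat % 2 ^ 32)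
    rw [r5, eSES, ← ersi, Nat.add_assoc]
    exact hsince
  · obtain ⟨r1, r2, r3, r4', r5⟩ := Cur.alloc_fail_any hfrS hcurS hmemS hRS e_sp' e_rdi w_same w_post hfit w_rip hrspR
      (Vorbis.conv_code_eqOn w_code) w_inv hr14R
    apply ReachVia.done
    exact Or.inr (Or.inr ⟨A, lengths, A2, A3, Ai, A.1,
      c6a_build_sparse hmidS sparse1S tempsS cntS r1 r2 r3 r4' (Arena.Extends.refl _) rfl rfl hrbxR hlenK (Or.inl r5)⟩)

/-- Segment C6a: the dense and the sparse book (`sparse ∈ {0, 1}`: `LengthsAt.sparse_01`). -/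
theorem c6a_walk : Vorbis.Spec.start_decoder_C6a.Statement := by
  intro Lay hLay μ hμ u₀ hcode hst4 hld4 h_error h_malloc
  intro g i v hat
  obtain ⟨A, lengths, count, A2, A3, Ai, h⟩ := hat
  rcases h.place.sparse_01 with h0 | h1
  · exact c6a_dense hLay hμ hcode hst4 hld4 h_error h_malloc h h0
  · exact c6a_sparse hLay hμ hcode hst4 hld4 h_error h_malloc h h1

end Vorbis.Spec.start_decoder_C6a

theorem Vorbis.Spec.Worked.start_decoder_C6a_ok : Vorbis.Spec.start_decoder_C6a.Statement := Vorbis.Spec.start_decoder_C6a.c6a_walk
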